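-- pv_equiv track=rewrite | github.com/Protonk/BIDDER | experiments/acm-champernowne/base2/forest/autocorrelation/echoes_three_population.py | spike_lags
-- ===== SOURCE A (Python) =====
-- def spike_lags(d_dom, max_lag, halo=1):
--     out = set()
--     for d in range(d_dom - halo, d_dom + halo + 1):
--         if d < 1:
--             continue
--         for k in range(1, max_lag // d + 1):
--             out.add(k * d)
--     return {t for t in out if 1 <= t <= max_lag}
-- ===== SOURCE B (Python) =====
-- def spike_lags(d_dom, max_lag, halo=1):
--     # band-by-band: the k-th band is k times the window, clipped to lags <= max_lag;
--     # stop at the first k whose band is empty (every later band is empty too).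
--     lo = max(d_dom - halo, 1)
--     hi = d_dom + halo
--     out = set()
--     k = 1
--     while lo <= hi and k * lo <= max_lag:
--         top = min(hi, max_lag // k)
--         out.update(range(k * lo, k * top + 1, k))
--         k += 1
--     return out
-- ===== Notes on version B (the rewrite author's own statement) =====
-- stated objective: alternative
-- what changed: A iterates divisors d of the window, counts multiples k up to max_lag//d, adds each k*d to a set one by one and re-filters the set; B transposes the enumeration: a while loop over bands k=1,2,... where the k-th band is k times the window clipped to max_lag//k, merged in bulk via set.update(range(k*lo, k*top+1, k)), stopping at the first empty band - no per-divisor counting, no d<1 guard, no per-element add, no final filter.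
import Mathlib
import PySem

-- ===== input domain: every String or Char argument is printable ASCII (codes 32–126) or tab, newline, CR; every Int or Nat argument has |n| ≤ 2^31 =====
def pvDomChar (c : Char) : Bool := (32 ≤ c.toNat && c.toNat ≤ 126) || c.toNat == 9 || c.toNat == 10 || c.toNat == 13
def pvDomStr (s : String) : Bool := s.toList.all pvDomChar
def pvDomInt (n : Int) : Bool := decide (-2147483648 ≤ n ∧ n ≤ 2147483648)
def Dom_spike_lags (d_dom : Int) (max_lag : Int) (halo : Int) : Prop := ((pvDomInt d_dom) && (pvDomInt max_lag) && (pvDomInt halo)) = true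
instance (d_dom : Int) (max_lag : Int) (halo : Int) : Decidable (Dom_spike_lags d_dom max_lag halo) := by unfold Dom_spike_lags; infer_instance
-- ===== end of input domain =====

-- ===== PORT A =====
-- B transposes A's divisor-wise multiple generation into a band-wise while loop with bulk range updates (measured faster in a timing run).
-- Both Pythons return a set; Python's set iteration order is not modelled (outputs are compared as finite
-- sets), so each port returns its set's elements in canonical ascending order via PySem.List.sorted.
def spike_lags (d_dom : Int) (max_lag : Int) (halo : Int) : List Int :=
  let out : PySem.Set Int :=
    (PySem.List.pyRange (d_dom - halo) (d_dom + halo + 1) 1).foldl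
      (fun out d =>
        if d < 1 then out
        else (PySem.List.pyRange 1 (PySem.Int.floordiv max_lag d + 1) 1).foldl
               (fun out k => PySem.Set.add out (k * d)) out)
      PySem.Set.empty
  PySem.List.sorted (out.filter (fun t => decide (1 ≤ t ∧ t ≤ max_lag))) (fun x => x) false

-- ===== PORT B =====
-- the while loop of Source B: while lo <= hi and k*lo <= max_lag, merge the k-th band
-- k*[lo .. min(hi, max_lag//k)] into out (set.update = fold of Set.add over the stepped range);
-- it terminates because lo ≥ 1 (carried as the proof argument hlo), so k*lo strictly grows.
def pvBands (lo hi max_lag : Int) (k : Int) (out : PySem.Set Int) (hlo : 1 ≤ lo) : PySem.Set Int :=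
  if h : lo ≤ hi ∧ k * lo ≤ max_lag then
    let top := min hi (PySem.Int.floordiv max_lag k)
    pvBands lo hi max_lag (k + 1)
      ((PySem.List.pyRange (k * lo) (k * top + 1) k).foldl PySem.Set.add out) hlo
  else out
termination_by (max_lag + 1 - k * lo).toNat
decreasing_by
  have : (k + 1) * lo = k * lo + lo := by ring
  omega

def spike_lags_alt (d_dom : Int) (max_lag : Int) (halo : Int) : List Int :=
  let lo := max (d_dom - halo) 1
  let hi := d_dom + halo
  PySem.List.sorted (pvBands lo hi max_lag 1 PySem.Set.empty (le_max_right _ _)) (fun x => x) false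

-- ===== PRECONDITION & SPEC =====
def Spec_spike_lags (d_dom : Int) (max_lag : Int) (halo : Int) (out : List Int) : Prop := out = spike_lags_alt d_dom max_lag halo
instance (d_dom : Int) (max_lag : Int) (halo : Int) (out : List Int) : Decidable (Spec_spike_lags d_dom max_lag halo out) := by unfold Spec_spike_lags; infer_instance

-- ===== CLAIM (what is proved, stated in full; the proofs are below) =====
def Claim_equal_spike_lags : Prop := ∀ (d_dom : Int) (max_lag : Int) (halo : Int), Dom_spike_lags d_dom max_lag halo → Spec_spike_lags d_dom max_lag halo (spike_lags d_dom max_lag halo)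

-- ===== LEMMAS AND PROOFS =====

-- membership through a fold that only grows the accumulator set by elements satisfying P
theorem pv_foldl_mem {α : Type} (g : PySem.Set Int → α → PySem.Set Int) (P : α → Int → Prop)
    (h : ∀ s a x, x ∈ g s a ↔ x ∈ s ∨ P a x) :
    ∀ (l : List α) (s : PySem.Set Int) (x : Int),
      x ∈ l.foldl g s ↔ x ∈ s ∨ ∃ a ∈ l, P a x := by
  intro l
  induction l with
  | nil => simp
  | cons a l ih =>
      intro s x
      simp [List.foldl_cons, ih, h]
      tauto

theorem pv_foldl_nodup {α : Type} (g : PySem.Set Int → α → PySem.Set Int)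
    (h : ∀ s a, s.Nodup → (g s a).Nodup) :
    ∀ (l : List α) (s : PySem.Set Int), s.Nodup → (l.foldl g s).Nodup := by
  intro l
  induction l with
  | nil => intro s hs; simpa using hs
  | cons a l ih => intro s hs; exact ih _ (h s a hs)

-- the accumulated set of A: t is in it iff some admissible d of the window generates it
theorem pv_mem_out (d_dom max_lag halo : Int) (t : Int) :
    (t ∈ (PySem.List.pyRange (d_dom - halo) (d_dom + halo + 1) 1).foldl
      (fun out d =>
        if d < 1 then out
        else (PySem.List.pyRange 1 (PySem.Int.floordiv max_lag d + 1) 1).foldl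
               (fun out k => PySem.Set.add out (k * d)) out)
      PySem.Set.empty) ↔
    ∃ d, (d_dom - halo ≤ d ∧ d < d_dom + halo + 1) ∧ 1 ≤ d ∧
      ∃ k, (1 ≤ k ∧ k ≤ PySem.Int.floordiv max_lag d) ∧ t = k * d := by
  rw [pv_foldl_mem _
    (fun d x => 1 ≤ d ∧ ∃ k, (1 ≤ k ∧ k ≤ PySem.Int.floordiv max_lag d) ∧ x = k * d)
    (by
      intro s d x
      by_cases hd : d < 1
      · simp only [if_pos hd]
        constructor
        · intro hx; exact Or.inl hx
        · rintro (hx | ⟨hd1, _⟩)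
          · exact hx
          · omega
      · simp only [if_neg hd]
        rw [pv_foldl_mem _ (fun k x => x = k * d) (by intro s k x; simp [PySem.Set.mem_add])]
        constructor
        · rintro (hx | ⟨k, hk, hx⟩)
          · exact Or.inl hx
          · refine Or.inr ⟨by omega, k, ?_, hx⟩
            rw [PySem.List.mem_pyRange_one] at hk
            omega
        · rintro (hx | ⟨_, k, hk, hx⟩)
          · exact Or.inl hx
          · refine Or.inr ⟨k, ?_, hx⟩
            rw [PySem.List.mem_pyRange_one]
            omega)]
  simp only [PySem.List.mem_pyRange_one]
  constructor
  · rintro (hx | ⟨d, hd, hd1, hk⟩)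
    · simp [PySem.Set.empty] at hx
    · exact ⟨d, hd, hd1, hk⟩
  · rintro ⟨d, hd, hd1, hk⟩
    exact Or.inr ⟨d, hd, hd1, hk⟩

-- membership in B's band recursion: t is there iff it was there already or some band j ≥ k holds it
theorem pv_mem_bands (lo hi N : Int) (hlo : 1 ≤ lo) :
    ∀ (n : ℕ) (k : Int) (out : PySem.Set Int) (t : Int), (N + 1 - k * lo).toNat = n →
      (t ∈ pvBands lo hi N k out hlo ↔
        t ∈ out ∨ ∃ j, k ≤ j ∧ lo ≤ hi ∧ j * lo ≤ N ∧
          t ∈ PySem.List.pyRange (j * lo) (j * min hi (PySem.Int.floordiv N j) + 1) j) := by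
  intro n
  induction n using Nat.strong_induction_on with
  | _ n ih =>
    intro k out t hn
    rw [pvBands]
    by_cases h : lo ≤ hi ∧ k * lo ≤ N
    · rw [dif_pos h]
      have hklo : (k + 1) * lo = k * lo + lo := by ring
      rw [ih (N + 1 - (k + 1) * lo).toNat (by omega) (k + 1) _ t rfl]
      rw [pv_foldl_mem PySem.Set.add (fun a x => x = a)
        (by intro s a x; simp [PySem.Set.mem_add])]
      constructor
      · rintro ((hx | ⟨a, ha, rfl⟩) | ⟨j, hj, hhi, hjN, hx⟩)
        · exact Or.inl hx
        · exact Or.inr ⟨k, le_refl k, h.1, h.2, ha⟩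
        · exact Or.inr ⟨j, by omega, hhi, hjN, hx⟩
      · rintro (hx | ⟨j, hj, hhi, hjN, hx⟩)
        · exact Or.inl (Or.inl hx)
        · rcases eq_or_lt_of_le hj with rfl | hj'
          · exact Or.inl (Or.inr ⟨t, hx, rfl⟩)
          · exact Or.inr ⟨j, by omega, hhi, hjN, hx⟩
    · rw [dif_neg h]
      constructor
      · exact Or.inl
      · rintro (hx | ⟨j, hj, hhi, hjN, _⟩)
        · exact hx
        · exfalso
          have : k * lo ≤ j * lo := mul_le_mul_of_nonneg_right hj (by omega)
          exact h ⟨hhi, by omega⟩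

-- arithmetic core: 'd in the window generates t as a bounded multiple' ⟷ 'some band j holds t'
theorem pv_mem_iff (lo hi N t : Int) (hlo : 1 ≤ lo) :
    ((∃ d, (lo ≤ d ∧ d ≤ hi) ∧ ∃ k, (1 ≤ k ∧ k ≤ PySem.Int.floordiv N d) ∧ t = k * d)
      ∧ 1 ≤ t ∧ t ≤ N) ↔
    (∃ j, 1 ≤ j ∧ lo ≤ hi ∧ j * lo ≤ N ∧
      (j * lo ≤ t ∧ t < j * min hi (PySem.Int.floordiv N j) + 1 ∧ j ∣ (t - j * lo))) := by
  constructor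
  · rintro ⟨⟨d, ⟨hld, hdh⟩, k, ⟨hk1, hkN⟩, rfl⟩, _, hN⟩
    have hdN : k * d ≤ N := by
      rw [PySem.Int.le_floordiv_iff_mul_le (by omega)] at hkN
      omega
    have hdle : d ≤ PySem.Int.floordiv N k := by
      rw [PySem.Int.le_floordiv_iff_mul_le (by omega), mul_comm]
      exact hdN
    refine ⟨k, hk1, by omega, ?_, ?_, ?_, ⟨d - lo, by ring⟩⟩
    · calc k * lo ≤ k * d := mul_le_mul_of_nonneg_left hld (by omega)
        _ ≤ N := hdN
    · exact mul_le_mul_of_nonneg_left hld (by omega)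
    · have : k * d ≤ k * min hi (PySem.Int.floordiv N k) :=
        mul_le_mul_of_nonneg_left (le_min hdh hdle) (by omega)
      omega
  · rintro ⟨j, hj1, hhi, hjN, hlot, htop, m, hm⟩
    have hd : t = j * (lo + m) := by linarith [hm]
    have hm0 : 0 ≤ m := by nlinarith
    set d := lo + m with hdd
    have hdh : d ≤ min hi (PySem.Int.floordiv N j) := by
      by_contra hcon
      push Not at hcon
      have : j * (min hi (PySem.Int.floordiv N j) + 1) ≤ j * d :=
        mul_le_mul_of_nonneg_left (by omega) (by omega)
      nlinarith
    have hdN : j * d ≤ N := by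
      have := (PySem.Int.le_floordiv_iff_mul_le (by omega : (0:Int) < j)).mp
        (le_trans hdh (min_le_right _ _))
      nlinarith [this]
    have ht1 : 1 ≤ t := by nlinarith
    refine ⟨⟨d, ⟨by omega, le_trans hdh (min_le_left _ _)⟩, j, ⟨hj1, ?_⟩, by omega⟩, ht1, by nlinarith⟩
    rw [PySem.Int.le_floordiv_iff_mul_le (by omega)]
    omega

-- B's band recursion never introduces duplicates
theorem pv_bands_nodup (lo hi N : Int) (hlo : 1 ≤ lo) :
    ∀ (n : ℕ) (k : Int) (out : PySem.Set Int), (N + 1 - k * lo).toNat = n →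
      out.Nodup → (pvBands lo hi N k out hlo).Nodup := by
  intro n
  induction n using Nat.strong_induction_on with
  | _ n ih =>
    intro k out hn hout
    rw [pvBands]
    by_cases h : lo ≤ hi ∧ k * lo ≤ N
    ·  rw [dif_pos h]
       have hklo : (k + 1) * lo = k * lo + lo := by ring
       exact ih (N + 1 - (k + 1) * lo).toNat (by omega) (k + 1) _ rfl
         (pv_foldl_nodup _ (fun s a => PySem.Set.nodup_add s a) _ _ hout)
    ·  rw [dif_neg h]; exact hout

-- ===== VERDICT (by name: the statement is the Claim_ definition above) =====
theorem spike_lags_spec : Claim_equal_spike_lags := by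
  intro d_dom max_lag halo _
  unfold Spec_spike_lags
  simp only [spike_lags, spike_lags_alt]
  rw [PySem.List.sorted_id_eq_sorted_id_iff_perm]
  set lo := max (d_dom - halo) 1 with hlodef
  set hi := d_dom + halo with hhidef
  have hlo : (1:Int) ≤ lo := le_max_right _ _
  set OUT := (PySem.List.pyRange (d_dom - halo) (d_dom + halo + 1) 1).foldl
      (fun out d =>
        if d < 1 then out
        else (PySem.List.pyRange 1 (PySem.Int.floordiv max_lag d + 1) 1).foldl
               (fun out k => PySem.Set.add out (k * d)) out)
      PySem.Set.empty with hOUT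
  have hnodA : OUT.Nodup := by
    rw [hOUT]
    refine pv_foldl_nodup _ ?_ _ _ (by simp [PySem.Set.empty])
    intro s d hs
    by_cases hd : d < 1
    · simpa [if_pos hd] using hs
    · simp only [if_neg hd]
      exact pv_foldl_nodup _ (fun s k => PySem.Set.nodup_add s (k * d)) _ _ hs
  rw [List.perm_ext_iff_of_nodup (hnodA.filter _)
    (pv_bands_nodup lo hi max_lag _ _ 1 PySem.Set.empty rfl (by simp [PySem.Set.empty]))]
  intro t
  rw [List.mem_filter]
  simp only [decide_eq_true_eq]
  have hA : (t ∈ OUT ∧ 1 ≤ t ∧ t ≤ max_lag) ↔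
      ((∃ d, (lo ≤ d ∧ d ≤ hi) ∧ ∃ k, (1 ≤ k ∧ k ≤ PySem.Int.floordiv max_lag d) ∧ t = k * d)
        ∧ 1 ≤ t ∧ t ≤ max_lag) := by
    rw [hOUT, pv_mem_out]
    constructor
    · rintro ⟨⟨d, hd, hd1, hk⟩, ht⟩
      exact ⟨⟨d, ⟨by omega, by omega⟩, hk⟩, ht⟩
    · rintro ⟨⟨d, ⟨h1, h2⟩, hk⟩, ht⟩
      exact ⟨⟨d, ⟨by omega, by omega⟩, by omega, hk⟩, ht⟩
  have hB : t ∈ pvBands lo hi max_lag 1 PySem.Set.empty hlo ↔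
      ∃ j, 1 ≤ j ∧ lo ≤ hi ∧ j * lo ≤ max_lag ∧
        (j * lo ≤ t ∧ t < j * min hi (PySem.Int.floordiv max_lag j) + 1 ∧ j ∣ (t - j * lo)) := by
    rw [pv_mem_bands lo hi max_lag hlo _ 1 PySem.Set.empty t rfl]
    constructor
    · rintro (hx | ⟨j, hj, hhi, hjN, hr⟩)
      · simp [PySem.Set.empty] at hx
      · rw [PySem.List.mem_pyRange_iff_of_pos (by omega : (0:Int) < j)] at hr
        exact ⟨j, hj, hhi, hjN, by omega, by omega, hr.2.2⟩
    · rintro ⟨j, hj, hhi, hjN, h1, h2, h3⟩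
      refine Or.inr ⟨j, hj, hhi, hjN, ?_⟩
      rw [PySem.List.mem_pyRange_iff_of_pos (by omega : (0:Int) < j)]
      exact ⟨h1, h2, h3⟩
  rw [hA, hB]
  exact pv_mem_iff lo hi max_lag t hlo
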